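-- pv_equiv track=rewrite | github.com/iiro33/advent_of_code_2022 | day_21.py | make_formula_gold
-- ===== SOURCE A (Python) =====
-- def make_formula_gold(input_dict, param):
--     right = input_dict[param]
--     if param == "root":
--         right = right.replace("+", "==").replace("-", "==").replace("/", "==").replace("*", "==")
--
--     if len(right) > 4:
--         right_list = right.split(" ")
--         doer_1 = make_formula_gold(input_dict, right_list[0])
--         operation = right_list[1]
--         doer_2 = make_formula_gold(input_dict, right_list[2])
--     elif param == "humn":
--         return "(x)"
--     else:
--         return "(" + right + ")"
--
--     return "(%s %s %s)" % (doer_1, operation, doer_2)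
-- ===== SOURCE B (Python) =====
-- def make_formula_gold(input_dict, param):
--     # Iterative post-order traversal with an explicit task stack and a value stack
--     # instead of A's recursion.
--     tasks = [("eval", param)]
--     vals = []
--     while tasks:
--         kind, x = tasks.pop()
--         if kind == "combine":
--             b = vals.pop()
--             a = vals.pop()
--             vals.append("(" + a + " " + x + " " + b + ")")
--         else:
--             right = input_dict[x]
--             if x == "root":
--                 right = right.replace("+", "==").replace("-", "==").replace("/", "==").replace("*", "==")
--             if len(right) > 4:
--                 parts = right.split(" ")
--                 tasks.append(("combine", parts[1]))
--                 tasks.append(("eval", parts[2]))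
--                 tasks.append(("eval", parts[0]))
--             elif x == "humn":
--                 vals.append("(x)")
--             else:
--                 vals.append("(" + right + ")")
--     return vals.pop()
-- ===== Notes on version B (the rewrite author's own statement) =====
-- stated objective: alternative
-- what changed: A's direct recursion over the expression tree is replaced by an iterative post-order traversal: an explicit task stack (eval/combine entries) and a value stack of finished substrings, combining two results whenever a combine task surfaces.
import Mathlib
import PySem

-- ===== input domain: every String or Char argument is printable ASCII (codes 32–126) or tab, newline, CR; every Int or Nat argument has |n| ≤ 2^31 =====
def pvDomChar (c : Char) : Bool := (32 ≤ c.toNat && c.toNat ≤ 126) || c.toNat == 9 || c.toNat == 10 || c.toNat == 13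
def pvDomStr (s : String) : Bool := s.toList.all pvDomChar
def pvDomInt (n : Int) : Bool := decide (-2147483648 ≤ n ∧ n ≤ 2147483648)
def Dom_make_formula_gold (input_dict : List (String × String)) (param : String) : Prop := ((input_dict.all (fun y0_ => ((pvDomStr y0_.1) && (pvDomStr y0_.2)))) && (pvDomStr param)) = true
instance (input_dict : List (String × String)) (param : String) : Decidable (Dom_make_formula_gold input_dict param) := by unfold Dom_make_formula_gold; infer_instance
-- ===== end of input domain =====

-- B replaces A's recursion by an iterative post-order traversal with an explicit
-- task stack and a value stack (objective: alternative decomposition, same cost).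

-- ===== PORT A =====
-- helpers shared by both Pythons line for line:
-- right.replace("+","==").replace("-","==").replace("/","==").replace("*","==")
def pvRepl (s : String) : String :=
  PySem.Str.replace (PySem.Str.replace (PySem.Str.replace (PySem.Str.replace s "+" "==") "-" "==") "/" "==") "*" "=="

-- input_dict[x] : first matching key (dict = association list); none = KeyError
def pvLookup (d : List (String × String)) (k : String) : Option String :=
  (d.find? (fun kv => kv.1 == k)).map (·.2)

-- the value actually examined for key x ('root' gets the replace chain)
def pvEff (x v : String) : String := if x == "root" then pvRepl v else v

-- A's recursion, fuel-bounded: on every input admitted by Pre_ the recursion depth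
-- is at most the dict length, so fuel length+1 never runs out there.
def pvGoA (d : List (String × String)) : Nat → String → String
  | 0, _ => ""                                   -- fuel exhausted: unreachable under Pre_
  | f + 1, param =>
    match pvLookup d param with
    | none => ""                                 -- Python: KeyError (outside Pre_)
    | some right0 =>
      let right := pvEff param right0
      if 4 < PySem.Str.len right then
        match PySem.Str.split? right " " with
        | none => ""                             -- unreachable: separator " " is nonempty
        | some rl =>
          match rl with
          | l :: op :: r :: _ =>                 -- right_list[0], [1], [2]
            "(" ++ pvGoA d f l ++ " " ++ op ++ " " ++ pvGoA d f r ++ ")"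
          | _ => ""                              -- Python: IndexError (outside Pre_)
      else if param == "humn" then "(x)"
      else "(" ++ right ++ ")"

def make_formula_gold (input_dict : List (String × String)) (param : String) : String :=
  pvGoA input_dict (input_dict.length + 1) param

-- ===== PORT B =====
inductive PvTask : Type
  | eval (name : String)
  | combine (op : String)
deriving DecidableEq, Repr

-- the while loop of Source B: head of the task list = top of the Python stack;
-- fuel-bounded (inside Pre_ the loop runs at most 4^(length+2) iterations)
def pvRunB (d : List (String × String)) : Nat → List PvTask → List String → List String
  | 0, _, vals => vals                           -- fuel exhausted: unreachable under Pre_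
  | _ + 1, [], vals => vals                      -- while loop ends
  | f + 1, PvTask.combine op :: ts, vals =>
    match vals with
    | b :: a :: vs => pvRunB d f ts (("(" ++ a ++ " " ++ op ++ " " ++ b ++ ")") :: vs)
    | _ => []                                    -- Python: pop from empty list (outside Pre_)
  | f + 1, PvTask.eval x :: ts, vals =>
    match pvLookup d x with
    | none => []                                 -- Python: KeyError (outside Pre_)
    | some right0 =>
      let right := pvEff x right0
      if 4 < PySem.Str.len right then
        match PySem.Str.split? right " " with
        | none => []                             -- unreachable: separator " " is nonempty
        | some rl =>
          match rl with
          | l :: op :: r :: _ =>                 -- push combine, eval right, eval left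
            pvRunB d f (PvTask.eval l :: PvTask.eval r :: PvTask.combine op :: ts) vals
          | _ => []                              -- Python: IndexError (outside Pre_)
      else if x == "humn" then pvRunB d f ts ("(x)" :: vals)
      else pvRunB d f ts (("(" ++ right ++ ")") :: vals)

def make_formula_gold_alt (input_dict : List (String × String)) (param : String) : String :=
  match pvRunB input_dict (4 ^ (input_dict.length + 2)) [PvTask.eval param] [] with
  | v :: _ => v                                  -- return vals.pop()
  | [] => ""                                     -- Python: pop from empty list (outside Pre_)

-- ===== PRECONDITION & SPEC =====
-- split on a single space, as a total function (the separator is nonempty)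
def pvParts (s : String) : List String :=
  (PySem.Chars.splitOn s.toList [' ']).map String.ofList

-- definedness level of a name in the dependency graph of the dict: a name is
-- defined at level n if it is a bound key and is a leaf (value of length ≤ 4 after
-- the 'root' substitution), or (for n > 0) names two operand keys defined at level
-- n-1.  This is the well-foundedness/definedness predicate of the dependency tree,
-- independent of the list order of the entries; unreachable entries are ignored.
def pvOkN (d : List (String × String)) : Nat → String → Bool
  | 0, k =>
    match pvLookup d k with
    | none => false
    | some v => !(decide (4 < PySem.Str.len (pvEff k v)))
  | n + 1, k =>
    match pvLookup d k with
    | none => false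
    | some v =>
      let right := pvEff k v
      if 4 < PySem.Str.len right then
        match pvParts right with
        | l :: _ :: r :: _ => pvOkN d n l && pvOkN d n r
        | _ => false
      else true

-- Pre_: the dependency tree under param is finite and fully bound — param is
-- defined at level (length of the dict), which holds for EVERY input on which
-- Python A returns (a terminating recursion never repeats a key on a path, so its
-- depth is at most the number of entries); the excluded inputs are exactly those
-- where A raises: KeyError (unbound name), IndexError (long value without two
-- operands) or RecursionError (cyclic definition).
def Pre_make_formula_gold (input_dict : List (String × String)) (param : String) : Prop :=
  pvOkN input_dict input_dict.length param = true
instance (input_dict : List (String × String)) (param : String) : Decidable (Pre_make_formula_gold input_dict param) := by unfold Pre_make_formula_gold; infer_instance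

def pvWitness_make_formula_gold : (List (String × String)) × String :=
  ([("root", "aa + bb"), ("aa", "1"), ("bb", "2")], "root")

def Spec_make_formula_gold (input_dict : List (String × String)) (param : String) (out : String) : Prop := out = make_formula_gold_alt input_dict param
instance (input_dict : List (String × String)) (param : String) (out : String) : Decidable (Spec_make_formula_gold input_dict param out) := by unfold Spec_make_formula_gold; infer_instance

-- ===== CLAIM (what is proved, stated in full; the proofs are below) =====
def Claim_equal_make_formula_gold : Prop := ∀ (input_dict : List (String × String)) (param : String), Dom_make_formula_gold input_dict param → Pre_make_formula_gold input_dict param → Spec_make_formula_gold input_dict param (make_formula_gold input_dict param)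

-- ===== LEMMAS AND PROOFS =====

-- splitting on " " always succeeds
theorem pvSplit_space (s : String) : PySem.Str.split? s " " = some (pvParts s) := by
  simp [PySem.Str.split?, PySem.Chars.split?, pvParts]

-- the stack machine consumes one eval task of a level-n name into one finished value
theorem pvRunB_sim (d : List (String × String)) :
    ∀ n k, pvOkN d n k = true →
      ∃ c, 0 < c ∧ c ≤ 4 ^ (n + 1) ∧
        ∀ ts vals f, pvRunB d (c + f) (PvTask.eval k :: ts) vals =
          pvRunB d f ts (pvGoA d (n + 1) k :: vals) := by
  intro n
  induction n with
  | zero =>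
    intro k hok
    rw [pvOkN] at hok
    cases hv : pvLookup d k with
    | none => rw [hv] at hok; simp at hok
    | some v =>
      rw [hv] at hok
      simp only [Bool.not_eq_true', decide_eq_false_iff_not] at hok
      refine ⟨1, Nat.one_pos, by norm_num, ?_⟩
      intro ts vals f
      rw [show 1 + f = f + 1 by omega, pvRunB, pvGoA, hv]
      simp only
      rw [if_neg hok, if_neg hok]
      by_cases hh : k = "humn" <;> simp [hh]
  | succ n ih =>
    intro k hok
    rw [pvOkN] at hok
    cases hv : pvLookup d k with
    | none => rw [hv] at hok; simp at hok
    | some v =>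
      rw [hv] at hok
      simp only at hok
      by_cases hlen : 4 < PySem.Str.len (pvEff k v)
      · rw [if_pos hlen] at hok
        rcases hp : pvParts (pvEff k v) with _ | ⟨l, _ | ⟨op, _ | ⟨r, rest⟩⟩⟩ <;>
          rw [hp] at hok <;> try simp at hok
        obtain ⟨cl, hcl0, hclb, hcle⟩ := ih l hok.1
        obtain ⟨cr, hcr0, hcrb, hcre⟩ := ih r hok.2
        have hpow : (4:Nat) ^ (n + 2) = 4 * 4 ^ (n + 1) := by ring
        refine ⟨cl + cr + 2, by omega, by rw [hpow]; omega, ?_⟩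
        intro ts vals f
        rw [show cl + cr + 2 + f = (cl + (cr + (1 + f))) + 1 by omega]
        rw [pvRunB, hv]
        simp only
        rw [if_pos hlen, pvSplit_space, hp]
        simp only
        rw [hcle, hcre, show 1 + f = f + 1 by omega, pvRunB]
        conv_rhs => rw [pvGoA]
        rw [hv]
        simp only
        rw [if_pos hlen, pvSplit_space, hp]
      · refine ⟨1, Nat.one_pos, Nat.one_le_pow _ _ (by norm_num), ?_⟩
        intro ts vals f
        rw [show 1 + f = f + 1 by omega, pvRunB, pvGoA, hv]
        simp only
        rw [if_neg hlen, if_neg hlen]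
        by_cases hh : k = "humn" <;> simp [hh]

theorem pvRunB_nil (d : List (String × String)) (f : Nat) (vals : List String) :
    pvRunB d f [] vals = vals := by
  cases f <;> rfl

-- ===== VERDICT (by name: the statement is the Claim_ definition above) =====
theorem make_formula_gold_spec : Claim_equal_make_formula_gold := by
  intro d param hdom hpre
  unfold Spec_make_formula_gold
  obtain ⟨c, hc0, hcb, hce⟩ := pvRunB_sim d d.length param hpre
  have hc4 : c ≤ 4 ^ (d.length + 2) :=
    le_trans hcb (Nat.pow_le_pow_right (by norm_num) (by omega))
  unfold make_formula_gold_alt make_formula_gold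
  rw [show 4 ^ (d.length + 2) = c + (4 ^ (d.length + 2) - c) by omega]
  rw [hce, pvRunB_nil]
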